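-- pv_equiv track=rewrite | github.com/Whitecki/ASD | Grafy/ćwiczenia/Application of DFS/ścieżka Hamiltona w DAGu.py | Amerykanski_bohater
-- ===== SOURCE A (Python) =====
-- def TS(G):
--     visited = [False for _ in range(len(G))]
--     result = []
--     for idx in range(len(G)):
--         if not visited[idx]:
--             dfsVisit(G, idx,result,visited)
--     result = result[::-1]
--     return result
--
-- def dfsVisit(G, s,result,visited):
--     visited[s] = True
--
--     for el in G[s]:
--         if not visited[el]:
--             dfsVisit(G, el,result,visited)
--     result.append(s)
--
-- def check(G,a,b):
--     for el in G[a]: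
--         if el == b:
--             return True
--     return False
--
-- def Amerykanski_bohater(G):
--     A = TS(G)
--     i = 0
--     while i < len(A) - 1:
--         if not check(G,A[i],A[i+1]):
--             return False
--         i+=1
--     return True
-- ===== SOURCE B (Python) =====
-- def Amerykanski_bohater(G):
--     n = len(G)
--     visited = [False] * n
--     order = []
--     for start in range(n):
--         if not visited[start]:
--             visited[start] = True
--             stack = [(start, list(G[start]))]
--             while stack:
--                 node, rest = stack.pop()
--                 if rest:
--                     el = rest[0]
--                     stack.append((node, rest[1:]))
--                     if not visited[el]:
--                         visited[el] = True
--                         stack.append((el, list(G[el])))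
--                 else:
--                     order.append(node)
--     order.reverse()
--     for a, b in zip(order, order[1:]):
--         if b not in G[a]:
--             return False
--     return True
-- ===== Notes on version B (the rewrite author's own statement) =====
-- stated objective: alternative
-- what changed: The recursive dfsVisit is replaced by an explicit-stack iterative DFS over (node, remaining-neighbours) frames producing the identical reverse postorder, and the index-based while/check scan is replaced by a single pass over adjacent pairs with a membership test.
import Mathlib
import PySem

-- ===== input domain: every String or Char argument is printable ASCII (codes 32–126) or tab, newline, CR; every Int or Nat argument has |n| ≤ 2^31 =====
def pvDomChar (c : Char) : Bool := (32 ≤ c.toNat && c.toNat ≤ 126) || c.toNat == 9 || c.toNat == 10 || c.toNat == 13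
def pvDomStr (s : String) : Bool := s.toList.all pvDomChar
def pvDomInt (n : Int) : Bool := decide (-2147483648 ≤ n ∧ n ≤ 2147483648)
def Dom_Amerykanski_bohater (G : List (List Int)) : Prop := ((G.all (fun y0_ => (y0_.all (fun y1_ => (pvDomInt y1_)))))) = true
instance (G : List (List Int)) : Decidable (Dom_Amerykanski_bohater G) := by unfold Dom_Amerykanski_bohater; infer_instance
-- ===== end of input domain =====

-- B replaces the recursive dfsVisit with an explicit-stack iterative DFS producing the
-- identical reverse postorder, and replaces the index-based while/check scan with a
-- single pass over adjacent pairs (objective: alternative decomposition, same cost).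

-- ===== PORT A =====

-- visited[s] = True  (in-range under Pre_; out of range Python raises, pySetD is a no-op there)
def pvMark (v : List Bool) (s : Int) : List Bool := PySem.List.pySetD v s true

-- needed by the ports' termination proofs (cited in decreasing_by)
theorem pvCount_set_true (v : List Bool) (k : Nat) (h : k < v.length)
    (hvk : v[k] = false) : (v.set k true).count false + 1 = v.count false := by
  rw [List.set_eq_take_append_cons_drop, if_pos h]
  conv_rhs => rw [show v = v.take k ++ v[k] :: v.drop (k+1) by
    have := List.getElem_cons_drop (as := v) (i := k) h
    rw [this]; exact (List.take_append_drop k v).symm]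
  simp [List.count_append, hvk]
  omega

theorem pyGet?_false_elim (v : List Bool) (i : Int)
    (h : PySem.List.pyGet? v i = some false) :
    ∃ k, PySem.List.pyIdx? v.length i = some k ∧ ∃ hk : k < v.length, v[k] = false := by
  unfold PySem.List.pyGet? at h
  cases hk : PySem.List.pyIdx? v.length i with
  | none => simp [hk] at h
  | some k =>
    rw [hk] at h
    simp only [Option.bind_some] at h
    have hklt : k < v.length := by
      by_contra hge
      simp [List.getElem?_eq_none (by omega : v.length ≤ k)] at h
    exact ⟨k, rfl, hklt, by
      have := List.getElem?_eq_getElem hklt (l := v)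
      rw [this] at h; exact Option.some.inj h⟩

theorem pvMark_count_lt (v : List Bool) (i : Int)
    (h : PySem.List.pyGet? v i = some false) :
    (pvMark v i).count false < v.count false := by
  obtain ⟨k, hk, hklt, hvk⟩ := pyGet?_false_elim v i h
  unfold pvMark PySem.List.pySetD PySem.List.pySet?
  rw [hk]
  simp only [Option.map_some, Option.getD_some]
  have := pvCount_set_true v k hklt hvk
  omega

-- recursive DFS of A, with fuel as the standard totality device (fuel is always
-- sufficient at the call sites; proven implicitly by the equivalence below)
mutual
def pvDfsA (G : List (List Int)) : Nat → Int → List Bool → List Int → List Bool × List Int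
  | 0, _, v, r => (v, r)
  | fuel + 1, s, v, r =>
      let v1 := pvMark v s
      let p := pvLoopA G fuel (PySem.List.pyGetD G s []) v1 r
      (p.1, p.2 ++ [s])
termination_by fuel _ _ _ => (fuel, 0)
def pvLoopA (G : List (List Int)) : Nat → List Int → List Bool → List Int → List Bool × List Int
  | _, [], v, r => (v, r)
  | fuel, el :: rest, v, r =>
      if PySem.List.pyGet? v el = some false then
        let p := pvDfsA G fuel el v r
        pvLoopA G fuel rest p.1 p.2
      else
        pvLoopA G fuel rest v r
termination_by fuel rest _ _ => (fuel, rest.length + 1)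
end

-- TS(G): DFS from every unvisited index, then reverse
def pvTSA (G : List (List Int)) : List Int :=
  ((PySem.List.pyRange 0 (G.length : Int) 1).foldl
    (fun (st : List Bool × List Int) idx =>
      if PySem.List.pyGet? st.1 idx = some false then
        pvDfsA G (G.length + 1) idx st.1 st.2
      else st)
    (List.replicate G.length false, [])).2.reverse

-- check(G, a, b)
def pvCheckGo : List Int → Int → Bool
  | [], _ => false
  | el :: rest, b => if el == b then true else pvCheckGo rest b

def pvCheckA (G : List (List Int)) (a b : Int) : Bool :=
  pvCheckGo (PySem.List.pyGetD G a []) b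

-- while i < len(A) - 1: …
def pvScanA (G : List (List Int)) (A : List Int) (i : Nat) : Bool :=
  if h : (i : Int) < (A.length : Int) - 1 then
    if pvCheckA G (PySem.List.pyGetD A (i : Int) 0) (PySem.List.pyGetD A ((i : Int) + 1) 0) = false then
      false
    else pvScanA G A (i + 1)
  else true
termination_by A.length - i
decreasing_by omega

def Amerykanski_bohater (G : List (List Int)) : Bool :=
  pvScanA G (pvTSA G) 0

-- ===== PORT B =====

-- iterative DFS: explicit stack of (node, remaining neighbours) frames
def pvRunStack (G : List (List Int)) :
    List (Int × List Int) → List Bool → List Int → List Bool × List Int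
  | [], v, ord => (v, ord)
  | (node, []) :: fr, v, ord => pvRunStack G fr v (ord ++ [node])
  | (node, el :: rest) :: fr, v, ord =>
      if PySem.List.pyGet? v el = some false then
        pvRunStack G ((el, PySem.List.pyGetD G el []) :: (node, rest) :: fr) (pvMark v el) ord
      else
        pvRunStack G ((node, rest) :: fr) v ord
termination_by st v _ => (v.count false, (st.map (fun p => p.2.length + 1)).sum)
decreasing_by
  · apply Prod.Lex.right
    simp
  · exact Prod.Lex.left _ _ (pvMark_count_lt v el (by assumption))
  · apply Prod.Lex.right
    simp

def pvOrderB (G : List (List Int)) : List Int :=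
  ((PySem.List.pyRange 0 (G.length : Int) 1).foldl
    (fun (st : List Bool × List Int) start =>
      if PySem.List.pyGet? st.1 start = some false then
        pvRunStack G [(start, PySem.List.pyGetD G start [])]
          (pvMark st.1 start) st.2
      else st)
    (List.replicate G.length false, [])).2.reverse

-- for a, b in zip(order, order[1:]): if b not in G[a]: return False
def pvPairsB (G : List (List Int)) : List Int → Bool
  | a :: b :: t =>
      if (PySem.List.pyGetD G a []).contains b then pvPairsB G (b :: t) else false
  | _ => true

def Amerykanski_bohater_alt (G : List (List Int)) : Bool :=
  pvPairsB G (pvOrderB G)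

-- ===== PRECONDITION & SPEC =====
-- Pre_ excludes exactly the inputs on which Python A raises IndexError: an adjacency
-- entry el with el < -len(G) or el ≥ len(G) makes `visited[el]` raise.
def Pre_Amerykanski_bohater (G : List (List Int)) : Prop :=
  ∀ row ∈ G, ∀ el ∈ row, PySem.Raise.InRange G.length el
instance (G : List (List Int)) : Decidable (Pre_Amerykanski_bohater G) := by
  unfold Pre_Amerykanski_bohater; infer_instance

def pvWitness_Amerykanski_bohater : List (List Int) := [[1], [2], []]

def Spec_Amerykanski_bohater (G : List (List Int)) (out : Bool) : Prop := out = Amerykanski_bohater_alt G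
instance (G : List (List Int)) (out : Bool) : Decidable (Spec_Amerykanski_bohater G out) := by unfold Spec_Amerykanski_bohater; infer_instance

-- ===== CLAIM (what is proved, stated in full; the proofs are below) =====
def Claim_equal_Amerykanski_bohater : Prop := ∀ (G : List (List Int)), Dom_Amerykanski_bohater G → Pre_Amerykanski_bohater G → Spec_Amerykanski_bohater G (Amerykanski_bohater G)

-- ===== LEMMAS AND PROOFS =====

theorem pvMark_length (v : List Bool) (s : Int) : (pvMark v s).length = v.length := by
  unfold pvMark PySem.List.pySetD PySem.List.pySet?
  cases PySem.List.pyIdx? v.length s <;> simp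

theorem pvCount_set_true_le (v : List Bool) (k : Nat) :
    (v.set k true).count false ≤ v.count false := by
  induction v generalizing k with
  | nil => simp
  | cons a t ih =>
    cases k with
    | zero => cases a <;> simp
    | succ m => simpa [List.count_cons] using ih m

theorem pvMark_count_le (v : List Bool) (s : Int) :
    (pvMark v s).count false ≤ v.count false := by
  unfold pvMark PySem.List.pySetD PySem.List.pySet?
  cases PySem.List.pyIdx? v.length s with
  | none => simp
  | some k => simpa using pvCount_set_true_le v k

-- joint monotonicity of A's DFS: visited never loses marks, length is preserved
theorem pvMono (G : List (List Int)) : ∀ fuel : Nat,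
    (∀ s v r, (pvDfsA G fuel s v r).1.count false ≤ v.count false ∧
      (pvDfsA G fuel s v r).1.length = v.length) ∧
    (∀ rest v r, (pvLoopA G fuel rest v r).1.count false ≤ v.count false ∧
      (pvLoopA G fuel rest v r).1.length = v.length) := by
  intro fuel
  induction fuel with
  | zero =>
    constructor
    · intro s v r; simp [pvDfsA]
    · intro rest
      induction rest with
      | nil => intro v r; simp [pvLoopA]
      | cons el rest ih =>
        intro v r
        rw [pvLoopA]
        split
        · have h1 := ih (pvDfsA G 0 el v r).1 (pvDfsA G 0 el v r).2
          simp [pvDfsA] at h1 ⊢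
          exact h1
        · exact ih v r
  | succ fuel ihf =>
    have hd : ∀ s v r, (pvDfsA G (fuel + 1) s v r).1.count false ≤ v.count false ∧
        (pvDfsA G (fuel + 1) s v r).1.length = v.length := by
      intro s v r
      rw [pvDfsA]
      have h1 := ihf.2 (PySem.List.pyGetD G s []) (pvMark v s) r
      have h2 := pvMark_count_le v s
      have h3 := pvMark_length v s
      exact ⟨le_trans h1.1 h2, h1.2.trans h3⟩
    refine ⟨hd, ?_⟩
    intro rest
    induction rest with
    | nil => intro v r; simp [pvLoopA]
    | cons el rest ih =>
      intro v r
      rw [pvLoopA]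
      split
      · have h1 := ih (pvDfsA G (fuel + 1) el v r).1 (pvDfsA G (fuel + 1) el v r).2
        have h2 := hd el v r
        exact ⟨le_trans h1.1 h2.1, h1.2.trans h2.2⟩
      · exact ih v r

theorem pyGet?_false_count_pos (v : List Bool) (el : Int)
    (h : PySem.List.pyGet? v el = some false) : 0 < v.count false := by
  obtain ⟨k, _, hk, hvk⟩ := pyGet?_false_elim v el h
  have : false ∈ v := hvk ▸ List.getElem_mem hk
  simpa [List.count_pos_iff] using this

-- the simulation: the explicit stack machine runs the nested recursion of A
theorem pvSim (G : List (List Int)) :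
    ∀ (fuel : Nat) (rest : List Int) (node : Int) (fr : List (Int × List Int))
      (v : List Bool) (ord : List Int), v.count false ≤ fuel →
      pvRunStack G ((node, rest) :: fr) v ord =
        pvRunStack G fr (pvLoopA G fuel rest v ord).1 ((pvLoopA G fuel rest v ord).2 ++ [node]) := by
  intro fuel
  induction fuel with
  | zero =>
    intro rest
    induction rest with
    | nil => intro node fr v ord _; rw [pvRunStack, pvLoopA]
    | cons el rest ih =>
      intro node fr v ord hv
      rw [pvRunStack, pvLoopA]
      split
      · exact absurd (pyGet?_false_count_pos v el (by assumption)) (by omega)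
      · exact ih node fr v ord hv
  | succ fuel ihf =>
    intro rest
    induction rest with
    | nil => intro node fr v ord _; rw [pvRunStack, pvLoopA]
    | cons el rest ih =>
      intro node fr v ord hv
      rw [pvRunStack, pvLoopA]
      split
      · rename_i hel
        have hlt := pvMark_count_lt v el hel
        rw [ihf (PySem.List.pyGetD G el []) el ((node, rest) :: fr) (pvMark v el) ord (by omega)]
        have hq := ((pvMono G fuel).2 (PySem.List.pyGetD G el []) (pvMark v el) ord).1
        rw [pvDfsA]
        exact ih node fr _ _ (by omega)
      · exact ih node fr v ord hv
  
theorem pvFoldStep_eq (G : List (List Int)) :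
    ∀ (l : List Int) (st : List Bool × List Int), st.1.length = G.length →
    l.foldl (fun (st : List Bool × List Int) idx =>
        if PySem.List.pyGet? st.1 idx = some false then
          pvDfsA G (G.length + 1) idx st.1 st.2
        else st) st
    = l.foldl (fun (st : List Bool × List Int) start =>
        if PySem.List.pyGet? st.1 start = some false then
          pvRunStack G [(start, PySem.List.pyGetD G start [])]
            (pvMark st.1 start) st.2
        else st) st := by
  intro l
  induction l with
  | nil => intro st _; rfl
  | cons idx l ih =>
    intro st hst
    simp only [List.foldl_cons]
    by_cases hc : PySem.List.pyGet? st.1 idx = some false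
    · rw [if_pos hc, if_pos hc]
      have hstep : pvDfsA G (G.length + 1) idx st.1 st.2
          = pvRunStack G [(idx, PySem.List.pyGetD G idx [])]
              (pvMark st.1 idx) st.2 := by
        have hlt := pvMark_count_lt st.1 idx hc
        have hle : st.1.count false ≤ st.1.length := List.count_le_length
        rw [pvSim G G.length (PySem.List.pyGetD G idx []) idx []
          (pvMark st.1 idx) st.2 (by omega)]
        rw [pvDfsA, pvRunStack]
      rw [← hstep]
      exact ih _ (((pvMono G (G.length + 1)).1 idx st.1 st.2).2.trans hst)
    · rw [if_neg hc, if_neg hc]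
      exact ih st hst

theorem pvTSA_eq_pvOrderB (G : List (List Int)) : pvTSA G = pvOrderB G := by
  unfold pvTSA pvOrderB
  rw [pvFoldStep_eq G (PySem.List.pyRange 0 (G.length : Int) 1)
    (List.replicate G.length false, []) (by simp)]

theorem pvCheck_eq_contains (G : List (List Int)) (a b : Int) :
    pvCheckA G a b = (PySem.List.pyGetD G a []).contains b := by
  unfold pvCheckA
  induction PySem.List.pyGetD G a [] with
  | nil => simp [pvCheckGo]
  | cons el rest ih =>
    rw [pvCheckGo]
    by_cases h : el = b
    · simp [h]
    · have h' : ¬ b = el := fun hh => h hh.symm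
      simp [h, h', ih]

theorem pvScan_eq_pairs (G : List (List Int)) :
    ∀ (A : List Int) (i : Nat), pvScanA G A i = pvPairsB G (A.drop i) := by
  intro A
  suffices h : ∀ d i, A.length - i ≤ d → pvScanA G A i = pvPairsB G (A.drop i) by
    intro i; exact h A.length i (by omega)
  intro d
  induction d with
  | zero =>
    intro i hi
    rw [pvScanA, dif_neg (by omega), List.drop_eq_nil_of_le (by omega)]
    simp [pvPairsB]
  | succ d ihd =>
    intro i hi
    rw [pvScanA]
    by_cases hcond : (i : Int) < (A.length : Int) - 1
    · rw [dif_pos hcond]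
      have hi1 : i + 1 < A.length := by omega
      have hdrop : A.drop i = A[i] :: A[i+1] :: A.drop (i+2) := by
        rw [List.drop_eq_getElem_cons (by omega : i < A.length),
          List.drop_eq_getElem_cons hi1]
      have hget1 : PySem.List.pyGetD A (i : Int) 0 = A[i] := by
        rw [PySem.List.pyGetD_natCast]; exact List.getD_eq_getElem _ _ (by omega)
      have hget2 : PySem.List.pyGetD A ((i : Int) + 1) 0 = A[i+1] := by
        have hcast : ((i : Int) + 1) = ((i + 1 : Nat) : Int) := by push_cast; ring
        rw [hcast, PySem.List.pyGetD_natCast]; exact List.getD_eq_getElem _ _ (by omega)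
      rw [hdrop, hget1, hget2, pvCheck_eq_contains, pvPairsB]
      cases hc : (PySem.List.pyGetD G A[i] []).contains A[i+1]
      · simp
      · simp only [Bool.true_eq_false, if_false, if_true]
        rw [← List.drop_eq_getElem_cons hi1, ihd (i+1) (by omega)]
    · rw [dif_neg hcond]
      cases hl : A.drop i with
      | nil => simp [pvPairsB]
      | cons a t =>
        cases t with
        | nil => simp [pvPairsB]
        | cons b t2 =>
          exfalso
          have := congrArg List.length hl
          simp at this
          omega

-- ===== VERDICT (by name: the statement is the Claim_ definition above) =====
theorem Amerykanski_bohater_spec : Claim_equal_Amerykanski_bohater := by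
  intro G _ _
  unfold Spec_Amerykanski_bohater Amerykanski_bohater Amerykanski_bohater_alt
  rw [pvScan_eq_pairs G (pvTSA G) 0, pvTSA_eq_pvOrderB]
  simp
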